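-- pv_equiv track=rewrite | github.com/lancelote/advent_of_code | src/year2022/day12a.py | construct_heightmap
-- ===== SOURCE A (Python) =====
-- from typing import TypeAlias
--
-- HeightMap: TypeAlias = list[list[int]]
--
-- def construct_heightmap(task: str) -> HeightMap:
--     heightmap: HeightMap = []
--
--     for line in task.splitlines():
--         row: list[int] = []
--
--         for x in line:
--             if x == "S":
--                 row.append(0)
--             elif x == "E":
--                 row.append(25)
--             else:
--                 row.append(ord(x) - 97)
--
--         heightmap.append(row)
--
--     return heightmap
-- ===== SOURCE B (Python) =====
-- _HEIGHT = {chr(k): k - 97 for k in range(128)}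
-- _HEIGHT["S"] = 0
-- _HEIGHT["E"] = 25
--
--
-- def construct_heightmap(task: str) -> list[list[int]]:
--     # One streaming pass over the characters: line splitting and height lookup
--     # happen together via a precomputed table, instead of splitlines() plus a
--     # per-character if/elif branch.
--     rows: list[list[int]] = []
--     cur: list[int] = []
--     prev_cr = False
--     for c in task:
--         if c == "\n":
--             if prev_cr:
--                 prev_cr = False
--                 continue
--             rows.append(cur)
--             cur = []
--         elif c == "\r":
--             rows.append(cur)
--             cur = []
--             prev_cr = True
--         else:
--             cur.append(_HEIGHT[c])
--             prev_cr = False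
--     if cur:
--         rows.append(cur)
--     return rows
-- ===== Notes on version B (the rewrite author's own statement) =====
-- stated objective: alternative
-- what changed: Replaces splitlines() plus a per-character if/elif branch with a single streaming pass over the string that splits lines (with explicit CR/LF/CRLF handling via a prev_cr flag) and maps each character through a precomputed 128-entry lookup table built once at module level.
import Mathlib
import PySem

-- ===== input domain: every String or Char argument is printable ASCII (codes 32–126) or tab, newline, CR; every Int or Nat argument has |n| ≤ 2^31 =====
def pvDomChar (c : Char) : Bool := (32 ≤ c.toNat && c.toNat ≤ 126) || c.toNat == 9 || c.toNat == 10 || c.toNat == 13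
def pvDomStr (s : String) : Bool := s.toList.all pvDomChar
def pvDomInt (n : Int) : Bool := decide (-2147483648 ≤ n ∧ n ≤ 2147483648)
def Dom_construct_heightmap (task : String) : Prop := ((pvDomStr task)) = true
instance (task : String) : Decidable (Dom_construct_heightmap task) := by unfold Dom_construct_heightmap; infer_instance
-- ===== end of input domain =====

set_option maxRecDepth 8192


-- B replaces A's splitlines + per-character if/elif loop by one streaming pass that splits
-- lines and maps heights together via a precomputed lookup table (alternative; same cost).

-- ===== PORT A =====
def construct_heightmap (task : String) : List (List Int) :=
  (PySem.Str.splitlines task).foldl (fun heightmap line =>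
    heightmap ++ [line.toList.foldl (fun row x =>
      row ++ [if x = 'S' then (0 : Int)
              else if x = 'E' then (25 : Int)
              else (x.toNat : Int) - 97]) []]) []

-- ===== PORT B =====
-- Source B's module-level table _HEIGHT = {chr(k): k-97 for k in range(128)}; _HEIGHT["S"]=0; _HEIGHT["E"]=25
def pvHeightTable : PySem.Dict Char Int :=
  (((PySem.List.pyRange 0 128).foldl
      (fun d k => d.insert (Char.ofNat k.toNat) (k - 97)) PySem.Dict.empty).insert 'S' 0).insert 'E' 25

-- one step of Source B's single for-loop; the state is (rows, cur, prev_cr).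
-- _HEIGHT[c] is ported as getD (exact on Dom: every Dom char has code < 128, so it is in the table).
def pvStep (st : List (List Int) × List Int × Bool) (c : Char) : List (List Int) × List Int × Bool :=
  if c = '\n' then
    if st.2.2 then (st.1, st.2.1, false)
    else (st.1 ++ [st.2.1], [], false)
  else if c = '\r' then (st.1 ++ [st.2.1], [], true)
  else (st.1, st.2.1 ++ [pvHeightTable.getD c 0], false)

def construct_heightmap_alt (task : String) : List (List Int) :=
  let st := task.toList.foldl pvStep ([], [], false)
  if st.2.1.isEmpty then st.1 else st.1 ++ [st.2.1]

-- ===== PRECONDITION & SPEC =====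
def Spec_construct_heightmap (task : String) (out : List (List Int)) : Prop := out = construct_heightmap_alt task
instance (task : String) (out : List (List Int)) : Decidable (Spec_construct_heightmap task out) := by unfold Spec_construct_heightmap; infer_instance

-- ===== CLAIM =====
def Claim_equal_construct_heightmap : Prop := ∀ (task : String), Dom_construct_heightmap task → Spec_construct_heightmap task (construct_heightmap task)

-- ===== LEMMAS AND PROOFS =====

-- A's per-character mapping
def pvF (c : Char) : Int :=
  if c = 'S' then 0 else if c = 'E' then 25 else (c.toNat : Int) - 97

-- Source B's final 'if cur: rows.append(cur)'
def pvFinish (st : List (List Int) × List Int × Bool) : List (List Int) :=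
  if st.2.1.isEmpty then st.1 else st.1 ++ [st.2.1]

-- a foldl that appends singletons is a map
theorem pv_foldl_push {α β : Type} (f : α → β) :
    ∀ (l : List α) (acc : List β), l.foldl (fun r x => r ++ [f x]) acc = acc ++ l.map f := by
  intro l
  induction l with
  | nil => intro acc; simp
  | cons c t ih => intro acc; simp [List.foldl, ih]

-- the table agrees with A's branch on every char of code < 128
theorem pv_table_eq (c : Char) (h : c.toNat < 128) : pvHeightTable.getD c 0 = pvF c := by
  have hbase : ((PySem.List.pyRange 0 128).foldl
      (fun d k => d.insert (Char.ofNat k.toNat) (k - 97)) PySem.Dict.empty).getD c 0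
      = (c.toNat : Int) - 97 := by
    have hrange : PySem.List.pyRange 0 128 = (List.range 128).map Int.ofNat := by decide
    have hitems := PySem.Dict.items_foldl_insert_fresh (PySem.List.pyRange 0 128)
      (fun k => Char.ofNat k.toNat) (fun k => k - 97) PySem.Dict.empty
      (fun a _ => PySem.Dict.contains_empty _)
      (by rw [hrange, List.map_map]; decide)
    apply PySem.Dict.getD_of_mem_items
    · rw [hitems]
      refine List.mem_append.mpr (Or.inr (List.mem_map.mpr ⟨(c.toNat : Int), ?_, ?_⟩))
      · rw [hrange]
        exact List.mem_map.mpr ⟨c.toNat, List.mem_range.mpr h, rfl⟩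
      · simp [Char.ofNat_toNat]
    · have hk : (List.foldl (fun d k => d.insert (Char.ofNat k.toNat) (k - 97))
          PySem.Dict.empty (PySem.List.pyRange 0 128)).keys
          = ((PySem.List.pyRange 0 128).map (fun k => Char.ofNat k.toNat)) := by
        simp only [PySem.Dict.keys, hitems, List.map_append, List.map_map]
        rfl
      rw [hk, hrange, List.map_map]
      decide
  unfold pvHeightTable pvF
  rw [PySem.Dict.getD_insert, PySem.Dict.getD_insert]
  by_cases hS : c = 'S'
  · subst hS; decide
  · by_cases hE : c = 'E'
    · subst hE; decide
    · simp [hS, hE, hbase]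

-- pvStep ignores the prev_cr flag on any character other than '\n'
theorem pv_step_flag (a : List (List Int)) (b : List Int) (p : Bool) (c : Char) (h : c ≠ '\n') :
    pvStep (a, b, p) c = pvStep (a, b, false) c := by
  unfold pvStep
  simp [h]

-- reduction equations for splitlines' scanner `go`
theorem pv_go_nil (isB : Char → Bool) (cur : List Char) (acc : List (List Char)) :
    PySem.Chars.splitlines.go isB [] cur acc
      = if cur.isEmpty then acc.reverse else (cur.reverse :: acc).reverse := by
  rw [PySem.Chars.splitlines.go.eq_def]

theorem pv_go_crlf (isB : Char → Bool) (rest cur : List Char) (acc : List (List Char)) :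
    PySem.Chars.splitlines.go isB ('\r' :: '\n' :: rest) cur acc
      = PySem.Chars.splitlines.go isB rest [] (cur.reverse :: acc) := by
  simp [PySem.Chars.splitlines.go]

theorem pv_go_cons (isB : Char → Bool) (c : Char) (rest cur : List Char) (acc : List (List Char))
    (hm : ∀ rest', c = '\r' → rest = '\n' :: rest' → False) :
    PySem.Chars.splitlines.go isB (c :: rest) cur acc
      = if isB c then PySem.Chars.splitlines.go isB rest [] (cur.reverse :: acc)
        else PySem.Chars.splitlines.go isB rest (c :: cur) acc := by
  rw [PySem.Chars.splitlines.go.eq_def]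
  split
  · rename_i heq
    exact absurd heq (List.cons_ne_nil _ _)
  · rename_i rest' _ _ heq
    injection heq with h1 h2
    exact (hm _ h1 h2).elim
  · rename_i c' rest' heq
    injection heq with h1 h2
    subst h1; subst h2
    rfl

-- `go`'s accumulator is a reversed prefix of its result
theorem pv_go_acc (isB : Char → Bool) :
    ∀ (s curC : List Char) (acc0 acc : List (List Char)),
      PySem.Chars.splitlines.go isB s curC acc
        = acc.reverse ++ PySem.Chars.splitlines.go isB s curC [] := by
  intro s curC acc0
  induction s, curC, acc0 using PySem.Chars.splitlines.go.induct (isB := isB) with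
  | case1 cur acc0 h => intro acc; simp [pv_go_nil, h]
  | case2 cur acc0 h => intro acc; simp [pv_go_nil, h]
  | case3 rest cur acc0 ih =>
    intro acc
    rw [pv_go_crlf, pv_go_crlf, ih (cur.reverse :: acc), ih [cur.reverse]]
    simp
  | case4 c rest cur acc0 hm hb ih =>
    intro acc
    rw [pv_go_cons isB c rest cur acc hm, pv_go_cons isB c rest cur [] hm, if_pos hb, if_pos hb,
      ih (cur.reverse :: acc), ih [cur.reverse]]
    simp
  | case5 c rest cur acc0 hm hb ih =>
    intro acc
    rw [pv_go_cons isB c rest cur acc hm, pv_go_cons isB c rest cur [] hm,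
      if_neg (by simp [hb]), if_neg (by simp [hb]), ih acc]

-- every Dom char has code < 128
theorem pv_dom_lt (c : Char) (h : pvDomChar c = true) : c.toNat < 128 := by
  unfold pvDomChar at h
  simp only [Bool.or_eq_true, Bool.and_eq_true, decide_eq_true_eq, beq_iff_eq] at h
  omega

-- a char with a given small code is that literal char
theorem pv_char_of_toNat (c : Char) (n : Nat) (h : c.toNat = n) : c = Char.ofNat n := by
  rw [← h, Char.ofNat_toNat]

-- Source B's streaming loop computes exactly the (mapped) result of splitlines' scanner `go`
theorem pv_loop_eq_go (isB : Char → Bool)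
    (hn : isB '\n' = true) (hr : isB '\r' = true)
    (hd : ∀ c, pvDomChar c = true → isB c = true → c = '\n' ∨ c = '\r') :
    ∀ (s curC : List Char) (acc0 : List (List Char)),
      (∀ c ∈ s, pvDomChar c = true) →
      ∀ R : List (List Int),
        pvFinish (s.foldl pvStep (R, curC.reverse.map pvF, false))
          = R ++ (PySem.Chars.splitlines.go isB s curC []).map (fun l => l.map pvF) := by
  intro s curC acc0
  induction s, curC, acc0 using PySem.Chars.splitlines.go.induct (isB := isB) with
  | case1 cur acc0 h =>
    intro _ R
    have hc : cur = [] := by simpa using h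
    subst hc
    simp [pv_go_nil, pvFinish]
  | case2 cur acc0 h =>
    intro _ R
    have hc : cur ≠ [] := by simpa using h
    rw [pv_go_nil, if_neg h]
    simp only [List.foldl_nil, pvFinish]
    rw [if_neg (by simpa using hc)]
    simp
  | case3 rest cur acc0 ih =>
    intro hall R
    have hrest : ∀ c ∈ rest, pvDomChar c = true := fun c hc => hall c (by simp [hc])
    have hstep : pvStep (pvStep (R, cur.reverse.map pvF, false) '\r') '\n'
        = (R ++ [cur.reverse.map pvF], ([] : List Char).reverse.map pvF, false) := by
      simp [pvStep]
    rw [List.foldl_cons, List.foldl_cons, hstep,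
      ih hrest (R ++ [cur.reverse.map pvF]),
      pv_go_crlf, pv_go_acc isB rest [] [] [cur.reverse]]
    simp
  | case4 c rest cur acc0 hm hb ih =>
    intro hall R
    have hdc : pvDomChar c = true := hall c (by simp)
    have hrest : ∀ x ∈ rest, pvDomChar x = true := fun x hx => hall x (by simp [hx])
    rw [pv_go_cons isB c rest cur [] hm, if_pos hb,
      pv_go_acc isB rest [] [] [cur.reverse]]
    rcases hd c hdc hb with hcn | hcr
    · subst hcn
      have hstep : pvStep (R, cur.reverse.map pvF, false) '\n'
          = (R ++ [cur.reverse.map pvF], ([] : List Char).reverse.map pvF, false) := by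
        simp [pvStep]
      rw [List.foldl_cons, hstep, ih hrest (R ++ [cur.reverse.map pvF])]
      simp
    · subst hcr
      have hstep : pvStep (R, cur.reverse.map pvF, false) '\r'
          = (R ++ [cur.reverse.map pvF], [], true) := by
        simp [pvStep]
      rw [List.foldl_cons, hstep]
      cases rest with
      | nil =>
        simp [pvFinish, pv_go_nil]
      | cons r rs =>
        have hrn : r ≠ '\n' := fun hrn => hm rs rfl (by rw [hrn])
        rw [List.foldl_cons, pv_step_flag _ _ _ _ hrn]
        have := ih hrest (R ++ [cur.reverse.map pvF])
        rw [show ((R ++ [cur.reverse.map pvF], ([] : List Int), false))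
            = (R ++ [cur.reverse.map pvF], ([] : List Char).reverse.map pvF, false) from by simp] at *
        rw [← List.foldl_cons, this]
        simp
  | case5 c rest cur acc0 hm hb ih =>
    intro hall R
    have hdc : pvDomChar c = true := hall c (by simp)
    have hrest : ∀ x ∈ rest, pvDomChar x = true := fun x hx => hall x (by simp [hx])
    have hcn : c ≠ '\n' := fun h => by rw [h] at hb; rw [hn] at hb; exact hb rfl
    have hcr : c ≠ '\r' := fun h => by rw [h] at hb; rw [hr] at hb; exact hb rfl
    have hstep : pvStep (R, cur.reverse.map pvF, false) c
        = (R, (c :: cur).reverse.map pvF, false) := by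
      simp [pvStep, hcn, hcr, pv_table_eq c (pv_dom_lt c hdc)]
    rw [List.foldl_cons, hstep, ih hrest R,
      pv_go_cons isB c rest cur [] hm, if_neg (by simp [hb])]

-- ===== VERDICT =====
theorem construct_heightmap_spec : Claim_equal_construct_heightmap := by
  intro task hdom
  unfold Spec_construct_heightmap
  have hall : ∀ c ∈ task.toList, pvDomChar c = true := by
    have := hdom
    unfold Dom_construct_heightmap pvDomStr at this
    simpa [List.all_eq_true] using this
  -- A's side: two push-folds are maps
  have hA : construct_heightmap task
      = (PySem.Chars.splitlines task.toList).map (fun l => l.map pvF) := by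
    unfold construct_heightmap
    rw [pv_foldl_push (fun line : String => line.toList.foldl (fun row x =>
      row ++ [if x = 'S' then (0 : Int) else if x = 'E' then (25 : Int)
              else (x.toNat : Int) - 97]) [])]
    rw [List.nil_append, PySem.Str.splitlines, List.map_map]
    apply List.map_congr_left
    intro l _
    simp only [Function.comp]
    rw [pv_foldl_push (fun x : Char =>
      if x = 'S' then (0 : Int) else if x = 'E' then (25 : Int) else (x.toNat : Int) - 97)]
    simp [pvF, String.toList_ofList]
  rw [hA]
  -- B's side: the streaming loop
  have hB : construct_heightmap_alt task
      = pvFinish (task.toList.foldl pvStep ([], ([] : List Char).reverse.map pvF, false)) := by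
    unfold construct_heightmap_alt pvFinish
    simp
  rw [hB]
  have hgoal : pvFinish (task.toList.foldl pvStep ([], ([] : List Char).reverse.map pvF, false))
      = [] ++ (PySem.Chars.splitlines task.toList).map (fun l => l.map pvF) := by
    unfold PySem.Chars.splitlines
    refine pv_loop_eq_go _ ?_ ?_ ?_ task.toList [] [] hall []
    · decide
    · decide
    · intro c hdc hb
      unfold pvDomChar at hdc
      simp only [Bool.or_eq_true, Bool.and_eq_true, decide_eq_true_eq, beq_iff_eq] at hdc hb
      have h10 : c.toNat = 10 ∨ c.toNat = 13 := by omega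
      rcases h10 with h | h
      · exact Or.inl (pv_char_of_toNat c 10 h)
      · exact Or.inr (pv_char_of_toNat c 13 h)
  rw [hgoal, List.nil_append]
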